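-- pv_equiv track=rewrite | github.com/brokenloop/FlaskChess | flask_app.py | san_history_to_html
-- ===== SOURCE A (Python) =====
-- def san_history_to_html(san_history):
--     """Converts a history of moves in Standard Algebraic Notation (SAN) to HTML that
--     can be displayed.
--
--     This is for use for chess games from macOS, because those from MPGN have input like
--     ['0.0.e4', 'e5', '1.0.Bc4', 'Bc5', '2.0.Qh5', 'g6']
--
--     >>> "1. e4 e5<br/>2. Nc3" == san_history_to_html(["e4", "e5", "Nc3"])
--     True
--     """
--     output = []
--     move_number = 1
--
--     for i, line in enumerate(san_history):
--         white = (0 == i % 2)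
--         if white:
--             if 0 < i:
--                 output.append("<br/>")
--             output.append(str(move_number) + ".")
--         else:
--             move_number += 1
--         output.append(" " + line)
--
--     return "".join(output)
-- ===== SOURCE B (Python) =====
-- def san_history_to_html(san_history):
--     moves = list(san_history)
--     n = len(moves)
--     groups = [
--         f"{j // 2 + 1}. " + moves[j] + (" " + moves[j + 1] if j + 1 < n else "")
--         for j in range(0, n, 2)
--     ]
--     return "<br/>".join(groups)
-- ===== Notes on version B (the rewrite author's own statement) =====
-- stated objective: alternative
-- what changed: Replaces A's per-element parity-flag fold (mutable output list and move counter over enumerate) by a pair-wise grouping pass: one group string per move pair indexed by range(0, n, 2), joined with '<br/>'.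
import Mathlib
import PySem

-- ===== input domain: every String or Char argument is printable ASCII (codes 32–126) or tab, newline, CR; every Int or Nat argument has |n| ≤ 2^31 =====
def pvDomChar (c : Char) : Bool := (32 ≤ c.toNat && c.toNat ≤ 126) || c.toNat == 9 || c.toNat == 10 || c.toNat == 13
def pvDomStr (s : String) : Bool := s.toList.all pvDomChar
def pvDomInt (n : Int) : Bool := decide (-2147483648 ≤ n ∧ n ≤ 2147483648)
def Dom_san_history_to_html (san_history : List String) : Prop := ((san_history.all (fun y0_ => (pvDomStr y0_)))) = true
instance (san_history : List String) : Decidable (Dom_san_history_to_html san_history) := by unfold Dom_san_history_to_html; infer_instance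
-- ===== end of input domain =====

-- B re-implements A by a pair-wise grouping pass (one group string per move pair, joined with "<br/>")
-- instead of A's per-element parity-flag fold; same cost, different decomposition ("alternative").

-- ===== PORT A =====
-- one loop iteration of A: state = (output, move_number), element = (i, line)
def stepA (st : List String × Int) (p : Int × String) : List String × Int :=
  let st1 :=
    if (0 : Int) = PySem.Int.mod p.1 2 then
      ((if (0 : Int) < p.1 then st.1 ++ ["<br/>"] else st.1) ++ [PySem.Int.toStr st.2 ++ "."], st.2)
    else
      (st.1, st.2 + 1)
  (st1.1 ++ [" " ++ p.2], st1.2)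

def san_history_to_html (san_history : List String) : String :=
  let st := (PySem.List.enumerate san_history 0).foldl stepA ([], 1)
  PySem.Str.join "" st.1

-- ===== PORT B =====
def san_history_to_html_alt (san_history : List String) : String :=
  let moves := san_history
  let n : Int := moves.length
  let groups := (PySem.List.pyRange 0 n 2).map (fun j =>
    PySem.Int.toStr (PySem.Int.floordiv j 2 + 1) ++ ". " ++ PySem.List.pyGetD moves j ""
      ++ (if j + 1 < n then " " ++ PySem.List.pyGetD moves (j + 1) "" else ""))
  PySem.Str.join "<br/>" groups

-- ===== PRECONDITION & SPEC =====
def Spec_san_history_to_html (san_history : List String) (out : String) : Prop := out = san_history_to_html_alt san_history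
instance (san_history : List String) (out : String) : Decidable (Spec_san_history_to_html san_history out) := by unfold Spec_san_history_to_html; infer_instance

-- ===== CLAIM (what is proved, stated in full; the proofs are below) =====
def Claim_equal_san_history_to_html : Prop := ∀ (san_history : List String), Dom_san_history_to_html san_history → Spec_san_history_to_html san_history (san_history_to_html san_history)

-- ===== LEMMAS AND PROOFS =====

-- pieces A's loop appends after the first full move, starting at an even index > 0 with move number k
def tailA : Int → List String → List String
  | _, [] => []
  | k, [x] => ["<br/>", PySem.Int.toStr k ++ ".", " " ++ x]
  | k, x :: y :: rest =>
      "<br/>" :: (PySem.Int.toStr k ++ ".") :: (" " ++ x) :: (" " ++ y) :: tailA (k + 1) rest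

-- B's group strings for the remaining moves, starting with move number k
def grpB : Int → List String → List String
  | _, [] => []
  | k, [x] => [PySem.Int.toStr k ++ ". " ++ x]
  | k, x :: y :: rest => (PySem.Int.toStr k ++ ". " ++ x ++ " " ++ y) :: grpB (k + 1) rest

lemma join_empty_str (sep : String) : PySem.Str.join sep [] = "" := by
  apply String.toList_inj.mp
  simp [PySem.Str.toList_join, PySem.Chars.join_nil]

lemma join0_cons (p : String) (rest : List String) :
    PySem.Str.join "" (p :: rest) = p ++ PySem.Str.join "" rest := by
  apply String.toList_inj.mp
  cases rest with
  | nil => simp [PySem.Str.toList_join, PySem.Chars.join_singleton, PySem.Chars.join_nil,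
      String.toList_append]
  | cons q t => simp [PySem.Str.toList_join, PySem.Chars.join_cons_cons, String.toList_append]

lemma joinbr_singleton (p : String) : PySem.Str.join "<br/>" [p] = p := by
  apply String.toList_inj.mp
  simp [PySem.Str.toList_join, PySem.Chars.join_singleton]

lemma joinbr_cons_cons (p q : String) (rest : List String) :
    PySem.Str.join "<br/>" (p :: q :: rest) = p ++ "<br/>" ++ PySem.Str.join "<br/>" (q :: rest) := by
  apply String.toList_inj.mp
  simp [PySem.Str.toList_join, PySem.Chars.join_cons_cons, String.toList_append]

lemma grpB_ne_nil (k : Int) (l : List String) (h : l ≠ []) : grpB k l ≠ [] := by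
  match l with
  | [] => exact absurd rfl h
  | [x] => simp [grpB]
  | x :: y :: rest => simp [grpB]

-- A's fold from an even positive index s with move number k appends exactly tailA k l
lemma foldA_spec (k : Int) (l : List String) : ∀ (s : Int) (acc : List String),
    0 < s → s % 2 = 0 →
    (PySem.List.enumerate l s).foldl stepA (acc, k) =
      (acc ++ tailA k l, k + (l.length / 2 : Nat)) := by
  induction k, l using tailA.induct with
  | case1 k =>
      intro s acc hs he
      simp [PySem.List.enumerate_nil, tailA]
  | case2 k x =>
      intro s acc hs he
      simp [PySem.List.enumerate_cons, PySem.List.enumerate_nil, stepA, he, hs, tailA]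
  | case3 k x y rest ih =>
      intro s acc hs he
      have h1 : (PySem.List.enumerate (x :: y :: rest) s).foldl stepA (acc, k) =
          (PySem.List.enumerate rest (s + 1 + 1)).foldl stepA
            (acc ++ ["<br/>", PySem.Int.toStr k ++ ".", " " ++ x, " " ++ y], k + 1) := by
        simp [PySem.List.enumerate_cons, stepA, he, hs, (by omega : 0 ≤ s)]
        rw [if_neg (by omega : ¬ ((0 : Int) = (s + 1) % 2))]
        simp
      rw [h1, ih (s + 1 + 1) _ (by omega) (by omega)]
      have hlen : (x :: y :: rest).length / 2 = rest.length / 2 + 1 := by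
        simp [List.length]; omega
      rw [hlen]
      simp only [Prod.mk.injEq]
      constructor
      · simp [tailA]
      · push_cast; ring

-- shifting an index past two cons cells
lemma pyGetD_shift (x y : String) (l : List String) (i : Int) (hi : 0 ≤ i) (d : String) :
    PySem.List.pyGetD (x :: y :: l) (i + 2) d = PySem.List.pyGetD l i d := by
  rw [PySem.List.pyGetD_of_nonneg _ _ (by omega), PySem.List.pyGetD_of_nonneg _ _ hi]
  have h2 : (i + 2).toNat = i.toNat + 2 := by omega
  rw [h2]
  rfl

-- B's comprehension, with number offset t, builds exactly grpB (t+1) l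
lemma B_groups : ∀ (k0 : Int) (l : List String) (t : Int),
    (List.range ((l.length + 1) / 2)).map (fun (k : Nat) =>
      PySem.Int.toStr ((k : Int) + t + 1) ++ ". " ++ PySem.List.pyGetD l (2 * (k : Int)) ""
        ++ (if 2 * (k : Int) + 1 < (l.length : Int) then
              " " ++ PySem.List.pyGetD l (2 * (k : Int) + 1) "" else ""))
      = grpB (t + 1) l := by
  intro k0 l
  induction k0, l using grpB.induct with
  | case1 k => intro t; simp [grpB]
  | case2 k x =>
      intro t
      have h0 : ((([x] : List String).length + 1) / 2) = 1 := by simp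
      rw [h0]
      simp [grpB, PySem.List.pyGetD_ofNat']
  | case3 k x y rest ih =>
      intro t
      have hm : (((x :: y :: rest).length + 1) / 2) = ((rest.length + 1) / 2) + 1 := by
        simp [List.length]; omega
      rw [hm, List.range_succ_eq_map, List.map_cons, List.map_map]
      have hhead : PySem.Int.toStr (((0 : Nat) : Int) + t + 1) ++ ". "
            ++ PySem.List.pyGetD (x :: y :: rest) (2 * ((0 : Nat) : Int)) ""
            ++ (if 2 * ((0 : Nat) : Int) + 1 < ((x :: y :: rest).length : Int) then
                  " " ++ PySem.List.pyGetD (x :: y :: rest) (2 * ((0 : Nat) : Int) + 1) "" else "")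
          = PySem.Int.toStr (t + 1) ++ ". " ++ x ++ " " ++ y := by
        have hc : (2 * ((0 : Nat) : Int) + 1 < ((x :: y :: rest).length : Int)) := by
          simp only [List.length_cons]; push_cast; omega
        rw [if_pos hc]
        norm_num [PySem.List.pyGetD_ofNat']
        apply String.toList_inj.mp
        simp [String.toList_append]
      have htail : (List.range ((rest.length + 1) / 2)).map
            ((fun (k : Nat) =>
              PySem.Int.toStr ((k : Int) + t + 1) ++ ". "
                ++ PySem.List.pyGetD (x :: y :: rest) (2 * (k : Int)) ""
                ++ (if 2 * (k : Int) + 1 < ((x :: y :: rest).length : Int) then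
                      " " ++ PySem.List.pyGetD (x :: y :: rest) (2 * (k : Int) + 1) "" else ""))
              ∘ Nat.succ)
          = grpB (t + 1 + 1) rest := by
        rw [← ih (t + 1)]
        apply List.map_congr_left
        intro a ha
        simp only [Function.comp]
        have e1 : ((Nat.succ a : Nat) : Int) + t + 1 = (a : Int) + (t + 1) + 1 := by
          push_cast; ring
        have e2 : 2 * ((Nat.succ a : Nat) : Int) = 2 * (a : Int) + 2 := by push_cast; ring
        rw [e1, e2, pyGetD_shift _ _ _ _ (by positivity) _]
        have e3 : 2 * (a : Int) + 2 + 1 = (2 * (a : Int) + 1) + 2 := by ring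
        rw [e3]
        by_cases h : 2 * (a : Int) + 1 < (rest.length : Int)
        · rw [if_pos (by simp only [List.length_cons]; push_cast at h ⊢; omega :
              (2 * (a : Int) + 1) + 2 < ((x :: y :: rest).length : Int)), if_pos h,
            pyGetD_shift _ _ _ _ (by positivity) _]
        · rw [if_neg (by simp only [List.length_cons]; push_cast at h ⊢; omega :
              ¬ ((2 * (a : Int) + 1) + 2 < ((x :: y :: rest).length : Int))), if_neg h]
      rw [hhead, htail, grpB]

-- B's port computes the "<br/>"-join of grpB 1
lemma B_eq (l : List String) :
    san_history_to_html_alt l = PySem.Str.join "<br/>" (grpB 1 l) := by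
  cases l with
  | nil =>
      simp [san_history_to_html_alt, PySem.List.pyRange, grpB, join_empty_str]
  | cons x rest =>
      show PySem.Str.join "<br/>"
          ((PySem.List.pyRange 0 ((x :: rest).length : Int) 2).map (fun j =>
            PySem.Int.toStr (PySem.Int.floordiv j 2 + 1) ++ ". "
              ++ PySem.List.pyGetD (x :: rest) j ""
              ++ (if j + 1 < ((x :: rest).length : Int) then
                    " " ++ PySem.List.pyGetD (x :: rest) (j + 1) "" else "")))
          = PySem.Str.join "<br/>" (grpB 1 (x :: rest))
      rw [PySem.List.pyRange_of_pos 0 ((x :: rest).length : Int) (show (0:Int) < 2 by norm_num)]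
      have hlt : (0 : Int) < ((x :: rest).length : Int) := by simp
      rw [if_pos hlt]
      have hm : ((((x :: rest).length : Int) - 0 + 2 - 1) / 2).toNat
          = ((x :: rest).length + 1) / 2 := by omega
      rw [hm, List.map_map]
      have hb := B_groups 0 (x :: rest) 0
      rw [show (0 : Int) + 1 = 1 from by norm_num] at hb
      rw [← hb]
      congr 1
      apply List.map_congr_left
      intro a ha
      simp only [Function.comp]
      have e0 : (0 : Int) + 2 * (a : Int) = 2 * (a : Int) := by ring
      rw [e0]
      have e1 : PySem.Int.floordiv (2 * (a : Int)) 2 = (a : Int) := by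
        simp [PySem.Int.floordiv]
      rw [e1]
      have e2 : (a : Int) + 0 + 1 = (a : Int) + 1 := by ring
      rw [e2]

-- join "" of A's tail pieces = "<br/>" followed by the "<br/>"-join of B's groups
lemma key (k0 : Int) (l0 : List String) :
    PySem.Str.join "" (tailA k0 l0) =
      if l0 = [] then "" else "<br/>" ++ PySem.Str.join "<br/>" (grpB k0 l0) := by
  induction k0, l0 using grpB.induct with
  | case1 k => simp [tailA, join_empty_str]
  | case2 k x =>
      rw [if_neg (by simp : ¬([x] : List String) = [])]
      simp only [tailA, grpB, join0_cons, joinbr_singleton, join_empty_str]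
      apply String.toList_inj.mp
      simp [String.toList_append]
  | case3 k x y rest ih =>
      rw [if_neg (by simp : ¬(x :: y :: rest : List String) = [])]
      simp only [tailA, grpB, join0_cons]
      rw [ih]
      by_cases hr : rest = []
      · subst hr
        rw [if_pos rfl]
        simp only [grpB, joinbr_singleton]
        apply String.toList_inj.mp
        simp [String.toList_append]
      · rw [if_neg hr]
        obtain ⟨g, gs, hg⟩ : ∃ g gs, grpB (k + 1) rest = g :: gs := by
          cases h' : grpB (k + 1) rest with
          | nil => exact absurd h' (grpB_ne_nil (k + 1) rest hr)
          | cons g gs => exact ⟨g, gs, rfl⟩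
        rw [hg, joinbr_cons_cons]
        apply String.toList_inj.mp
        simp [String.toList_append]

-- ===== VERDICT (by name: the statement is the Claim_ definition above) =====
theorem san_history_to_html_spec : Claim_equal_san_history_to_html := by
  unfold Claim_equal_san_history_to_html
  intro l _
  unfold Spec_san_history_to_html
  rw [B_eq]
  match l with
  | [] =>
      simp [san_history_to_html, PySem.List.enumerate_nil, grpB, join_empty_str]
  | [x] =>
      unfold san_history_to_html
      simp only [PySem.List.enumerate_cons, PySem.List.enumerate_nil, List.foldl, stepA]
      norm_num [PySem.Int.mod, grpB, join0_cons, joinbr_singleton, join_empty_str]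
      apply String.toList_inj.mp
      simp [String.toList_append]
  | x :: y :: rest =>
      unfold san_history_to_html
      have h1 : (PySem.List.enumerate (x :: y :: rest) 0).foldl stepA ([], 1) =
          (PySem.List.enumerate rest 2).foldl stepA
            ([PySem.Int.toStr 1 ++ ".", " " ++ x, " " ++ y], 2) := by
        simp [PySem.List.enumerate_cons, stepA]
      rw [h1, foldA_spec 2 rest 2 _ (by norm_num) (by norm_num)]
      simp only [List.cons_append, List.nil_append, join0_cons]
      rw [key 2 rest]
      simp only [grpB]
      by_cases hr : rest = []
      · subst hr
        rw [if_pos rfl]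
        simp only [grpB, joinbr_singleton]
        apply String.toList_inj.mp
        simp [String.toList_append]
      · rw [if_neg hr]
        obtain ⟨g, gs, hg⟩ : ∃ g gs, grpB (1 + 1) rest = g :: gs := by
          cases h' : grpB (1 + 1) rest with
          | nil => exact absurd h' (grpB_ne_nil (1 + 1) rest hr)
          | cons g gs => exact ⟨g, gs, rfl⟩
        have hg2 : grpB 2 rest = g :: gs := by rw [← hg]; norm_num
        rw [hg2, hg, joinbr_cons_cons]
        apply String.toList_inj.mp
        simp [String.toList_append]
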